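-- pv_equiv track=rewrite | github.com/zlzzq/TaiJi-Wiki | scripts/compile_sanxi_topic.py | build_review_report
-- ===== SOURCE A (Python) =====
-- from typing import Any
--
-- def build_review_report(records: list[dict[str, Any]]) -> str:
--     high = sum(1 for record in records if record["confidence"] == "high")
--     medium = sum(1 for record in records if record["confidence"] == "medium")
--     low = sum(1 for record in records if record["confidence"] == "low")
--     return f"""# 三晳九境专题评审报告
--
-- ## 多 agent 输出
--
-- - Round 1 Agent A：证据索引，已归并为 `evidence.jsonl`。
-- - Round 1 Agent B：概念结构，已吸收进 `concept_graph.md` 与私版专题页。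
-- - Round 1 Agent D：误区审查，已吸收进私版、公版误区段。
-- - Round 2 Agent C：课程化表达，已整理为 `teaching_lesson.md` 与 `qa_drills.md`。
-- - Round 2 Agent E：公开安全页，已整理为 `public_page.md`。
-- - Round 2 Agent F：质量评审，已用于降确定性、收口径、分私公。
--
-- ## 证据统计
--
-- - high：{high}
-- - medium：{medium}
-- - low：{low}
-- - 总计：{len(records)}
--
-- ## 主要修订决策
--
-- - 九境表可直接采用，但必须紧跟“不是九个孤立格子”的提醒。
-- - “有、有无、无”只作为讲解顺序，不写成线性台阶。
-- - “无生、无对、无变”不定义为终极断语，只说明不是简单否定。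
-- - 化生/生成、流行/变化写成口径差异，不写成互相替代。
-- - 公版只保留 6 条短摘句，主体用白话编译。
--
-- ## 公开安全检查
--
-- - `public_page.md` 不含 `## 全文`。
-- - `public_page.md` 不含本地全文路径。
-- - 短摘句 6 条。
-- - 同一来源短摘句不超过 2 条。
-- - 单条短摘句不超过 40 个汉字。
--
-- ## 后续优化
--
-- - 下一轮可做“生中有对有变”的专题练习页。
-- - 再下一轮可把“生成/化生”和“变化/流行”的口径差异单独编成术语页。
-- - 全站优化应按专题推进，不宜一次性重写 66 篇。
-- """
-- ===== SOURCE B (Python) =====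
-- from typing import Any
--
-- TEMPLATE = """# 三晳九境专题评审报告
--
-- ## 多 agent 输出
--
-- - Round 1 Agent A：证据索引，已归并为 `evidence.jsonl`。
-- - Round 1 Agent B：概念结构，已吸收进 `concept_graph.md` 与私版专题页。
-- - Round 1 Agent D：误区审查，已吸收进私版、公版误区段。
-- - Round 2 Agent C：课程化表达，已整理为 `teaching_lesson.md` 与 `qa_drills.md`。
-- - Round 2 Agent E：公开安全页，已整理为 `public_page.md`。
-- - Round 2 Agent F：质量评审，已用于降确定性、收口径、分私公。
--
-- ## 证据统计
--
-- - high：{high}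
-- - medium：{medium}
-- - low：{low}
-- - 总计：{total}
--
-- ## 主要修订决策
--
-- - 九境表可直接采用，但必须紧跟“不是九个孤立格子”的提醒。
-- - “有、有无、无”只作为讲解顺序，不写成线性台阶。
-- - “无生、无对、无变”不定义为终极断语，只说明不是简单否定。
-- - 化生/生成、流行/变化写成口径差异，不写成互相替代。
-- - 公版只保留 6 条短摘句，主体用白话编译。
--
-- ## 公开安全检查
--
-- - `public_page.md` 不含 `## 全文`。
-- - `public_page.md` 不含本地全文路径。
-- - 短摘句 6 条。
-- - 同一来源短摘句不超过 2 条。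
-- - 单条短摘句不超过 40 个汉字。
--
-- ## 后续优化
--
-- - 下一轮可做“生中有对有变”的专题练习页。
-- - 再下一轮可把“生成/化生”和“变化/流行”的口径差异单独编成术语页。
-- - 全站优化应按专题推进，不宜一次性重写 66 篇。
-- """
--
--
-- def build_review_report(records: list[dict[str, Any]]) -> str:
--     # Sort the confidence values so equal values form contiguous runs, then
--     # read each count from the length of its run in a single scan.
--     vals = sorted(record["confidence"] for record in records)
--     high = medium = low = 0
--     i = 0
--     n = len(vals)
--     while i < n:
--         j = i + 1
--         while j < n and vals[j] == vals[i]: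
--             j += 1
--         if vals[i] == "high":
--             high = j - i
--         elif vals[i] == "medium":
--             medium = j - i
--         elif vals[i] == "low":
--             low = j - i
--         i = j
--     return TEMPLATE.format(high=high, medium=medium, low=low, total=len(records))
-- ===== Notes on version B (the rewrite author's own statement) =====
-- stated objective: alternative
-- what changed: Instead of A's three filtered scans over records, B sorts the extracted confidence values and makes one run-length scan over the sorted list, reading each of the three counts from the length of its contiguous run; the report is filled via a str.format template.
import Mathlib
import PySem

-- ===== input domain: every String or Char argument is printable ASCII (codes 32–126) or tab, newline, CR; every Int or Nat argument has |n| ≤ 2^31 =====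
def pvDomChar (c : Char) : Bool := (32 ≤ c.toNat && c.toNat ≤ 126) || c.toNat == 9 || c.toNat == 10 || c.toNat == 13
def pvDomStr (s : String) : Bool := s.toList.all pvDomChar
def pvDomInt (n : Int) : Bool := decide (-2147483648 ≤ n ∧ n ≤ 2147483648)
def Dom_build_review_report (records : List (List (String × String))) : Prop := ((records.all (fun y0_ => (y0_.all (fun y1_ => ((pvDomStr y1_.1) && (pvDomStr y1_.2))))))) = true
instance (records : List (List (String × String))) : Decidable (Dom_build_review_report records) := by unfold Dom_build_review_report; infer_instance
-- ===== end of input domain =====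

-- B replaces A's three filtered scans by sort + one run-length scan of the sorted confidence values (alternative algorithm, not claimed faster).

-- ===== PORT A =====
def build_review_report (records : List (List (String × String))) : String :=
  let high : Int := records.foldl (fun acc record => if ((record.find? (fun p => p.1 == "confidence")).map (fun p => p.2)).getD "" == "high" then acc + 1 else acc) 0
  let medium : Int := records.foldl (fun acc record => if ((record.find? (fun p => p.1 == "confidence")).map (fun p => p.2)).getD "" == "medium" then acc + 1 else acc) 0
  let low : Int := records.foldl (fun acc record => if ((record.find? (fun p => p.1 == "confidence")).map (fun p => p.2)).getD "" == "low" then acc + 1 else acc) 0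
  "# 三晳九境专题评审报告\n\n## 多 agent 输出\n\n- Round 1 Agent A：证据索引，已归并为 `evidence.jsonl`。\n- Round 1 Agent B：概念结构，已吸收进 `concept_graph.md` 与私版专题页。\n- Round 1 Agent D：误区审查，已吸收进私版、公版误区段。\n- Round 2 Agent C：课程化表达，已整理为 `teaching_lesson.md` 与 `qa_drills.md`。\n- Round 2 Agent E：公开安全页，已整理为 `public_page.md`。\n- Round 2 Agent F：质量评审，已用于降确定性、收口径、分私公。\n\n## 证据统计\n\n- high：" ++ PySem.Int.toStr high ++ "\n- medium：" ++ PySem.Int.toStr medium ++ "\n- low：" ++ PySem.Int.toStr low ++ "\n- 总计：" ++ PySem.Int.toStr (records.length : Int) ++ "\n\n## 主要修订决策\n\n- 九境表可直接采用，但必须紧跟“不是九个孤立格子”的提醒。\n- “有、有无、无”只作为讲解顺序，不写成线性台阶。\n- “无生、无对、无变”不定义为终极断语，只说明不是简单否定。\n- 化生/生成、流行/变化写成口径差异，不写成互相替代。\n- 公版只保留 6 条短摘句，主体用白话编译。\n\n## 公开安全检查\n\n- `public_page.md` 不含 `## 全文`。\n- `public_page.md` 不含本地全文路径。\n- 短摘句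 6 条。\n- 同一来源短摘句不超过 2 条。\n- 单条短摘句不超过 40 个汉字。\n\n## 后续优化\n\n- 下一轮可做“生中有对有变”的专题练习页。\n- 再下一轮可把“生成/化生”和“变化/流行”的口径差异单独编成术语页。\n- 全站优化应按专题推进，不宜一次性重写 66 篇。\n"

-- ===== PORT B =====
-- the two nested while loops of Source B: at each step the inner while advances j past the
-- run of elements equal to vals[i] (takeWhile/dropWhile of the tail), records its length
-- into the matching counter, and the outer loop resumes at i = j.
def pvRunTally (l : List String) (high medium low : Int) : Int × Int × Int :=
  match l with
  | [] => (high, medium, low)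
  | x :: rest =>
    let cnt : Int := 1 + ((rest.takeWhile (fun y => y == x)).length : Int)
    let rest' := rest.dropWhile (fun y => y == x)
    if x == "high" then pvRunTally rest' cnt medium low
    else if x == "medium" then pvRunTally rest' high cnt low
    else if x == "low" then pvRunTally rest' high medium cnt
    else pvRunTally rest' high medium low
termination_by l.length
decreasing_by all_goals
  exact Nat.lt_succ_of_le (List.length_dropWhile_le _ _)

def build_review_report_alt (records : List (List (String × String))) : String :=
  let vals := PySem.List.sorted (records.map (fun record => ((record.find? (fun p => p.1 == "confidence")).map (fun p => p.2)).getD "")) (fun x => x) false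
  let t := pvRunTally vals 0 0 0
  "# 三晳九境专题评审报告\n\n## 多 agent 输出\n\n- Round 1 Agent A：证据索引，已归并为 `evidence.jsonl`。\n- Round 1 Agent B：概念结构，已吸收进 `concept_graph.md` 与私版专题页。\n- Round 1 Agent D：误区审查，已吸收进私版、公版误区段。\n- Round 2 Agent C：课程化表达，已整理为 `teaching_lesson.md` 与 `qa_drills.md`。\n- Round 2 Agent E：公开安全页，已整理为 `public_page.md`。\n- Round 2 Agent F：质量评审，已用于降确定性、收口径、分私公。\n\n## 证据统计\n\n- high：" ++ PySem.Int.toStr t.1 ++ "\n- medium：" ++ PySem.Int.toStr t.2.1 ++ "\n- low：" ++ PySem.Int.toStr t.2.2 ++ "\n- 总计：" ++ PySem.Int.toStr (records.length : Int) ++ "\n\n## 主要修订决策\n\n- 九境表可直接采用，但必须紧跟“不是九个孤立格子”的提醒。\n- “有、有无、无”只作为讲解顺序，不写成线性台阶。\n- “无生、无对、无变”不定义为终极断语，只说明不是简单否定。\n- 化生/生成、流行/变化写成口径差异，不写成互相替代。\n- 公版只保留 6 条短摘句，主体用白话编译。\n\n## 公开安全检查\n\n- `public_page.md` 不含 `##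 全文`。\n- `public_page.md` 不含本地全文路径。\n- 短摘句 6 条。\n- 同一来源短摘句不超过 2 条。\n- 单条短摘句不超过 40 个汉字。\n\n## 后续优化\n\n- 下一轮可做“生中有对有变”的专题练习页。\n- 再下一轮可把“生成/化生”和“变化/流行”的口径差异单独编成术语页。\n- 全站优化应按专题推进，不宜一次性重写 66 篇。\n"

-- ===== PRECONDITION & SPEC =====
-- Pre_ excludes records without a "confidence" key, on which the Python A raises KeyError.
def Pre_build_review_report (records : List (List (String × String))) : Prop :=
  (records.all (fun record => ((record.find? (fun p => p.1 == "confidence")).map (fun p => p.2)).isSome)) = true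
instance (records : List (List (String × String))) : Decidable (Pre_build_review_report records) := by unfold Pre_build_review_report; infer_instance
def pvWitness_build_review_report : (List (List (String × String))) := [[("confidence", "high")], [("confidence", "odd")]]
def Spec_build_review_report (records : List (List (String × String))) (out : String) : Prop := out = build_review_report_alt records
instance (records : List (List (String × String))) (out : String) : Decidable (Spec_build_review_report records out) := by unfold Spec_build_review_report; infer_instance

-- ===== CLAIM (what is proved, stated in full; the proofs are below) =====
def Claim_equal_build_review_report : Prop := ∀ (records : List (List (String × String))), Dom_build_review_report records → Pre_build_review_report records → Spec_build_review_report records (build_review_report records)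

-- ===== LEMMAS AND PROOFS =====

theorem pv_count_fold {α : Type} (f : α → String) (v : String) (l : List α) (n : Int) :
    l.foldl (fun acc r => if f r == v then acc + 1 else acc) n = n + ((l.map f).count v : Int) := by
  induction l generalizing n with
  | nil => simp
  | cons x xs ih =>
    simp only [List.foldl_cons, List.map_cons, List.count_cons, ih]
    by_cases h : f x == v
    · simp [h]; ring
    · simp [h]

-- in a ≤-sorted list the head does not recur after its initial run
theorem pv_not_mem_dropWhile (x : String) (rest : List String)
    (hp : (x :: rest).Pairwise (· ≤ ·)) : x ∉ rest.dropWhile (fun y => y == x) := by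
  intro hmem
  rcases hd : rest.dropWhile (fun y => y == x) with _ | ⟨d, ds⟩
  · simp [hd] at hmem
  · have hdx : ¬ (d == x) = true := by
      have := List.head?_dropWhile_not (p := fun y => y == x) (l := rest)
      rw [hd] at this; simpa using this
    have hsub : (rest.dropWhile (fun y => y == x)).Sublist rest := List.dropWhile_sublist _
    have hps : (d :: ds).Pairwise (· ≤ ·) := by
      rw [← hd]; exact (List.pairwise_cons.mp hp).2.sublist hsub
    have hxle : ∀ y ∈ rest, x ≤ y := (List.pairwise_cons.mp hp).1
    have hxd : x ≤ d := hxle d (hsub.mem (by rw [hd]; exact List.mem_cons_self))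
    have hlt : x < d := lt_of_le_of_ne hxd (fun h => hdx (by simp [h.symm]))
    rw [hd] at hmem
    rcases List.mem_cons.mp hmem with h | h
    · exact absurd h (ne_of_lt hlt)
    · exact absurd ((List.pairwise_cons.mp hps).1 x h) (not_le_of_gt hlt)

-- the head's run in a ≤-sorted list is exactly its count
theorem pv_run_count (x : String) (rest : List String) (hp : (x :: rest).Pairwise (· ≤ ·)) :
    (x :: rest).count x = 1 + (rest.takeWhile (fun y => y == x)).length := by
  have hsplit : rest = rest.takeWhile (fun y => y == x) ++ rest.dropWhile (fun y => y == x) :=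
    (List.takeWhile_append_dropWhile).symm
  have htake : (rest.takeWhile (fun y => y == x)).count x = (rest.takeWhile (fun y => y == x)).length := by
    apply List.count_eq_length.mpr
    intro y hy
    have hyx := List.mem_takeWhile_imp (p := fun y => y == x) hy
    exact (eq_of_beq hyx).symm
  have hdrop : (rest.dropWhile (fun y => y == x)).count x = 0 :=
    List.count_eq_zero.mpr (pv_not_mem_dropWhile x rest hp)
  calc (x :: rest).count x = rest.count x + 1 := by simp
    _ = 1 + (rest.takeWhile (fun y => y == x)).length := by
        conv_lhs => rw [hsplit]
        rw [List.count_append, htake, hdrop]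
        omega

theorem pv_count_dropWhile (x v : String) (hne : x ≠ v) (rest : List String) :
    (rest.dropWhile (fun y => y == x)).count v = (x :: rest).count v := by
  have hsplit : rest = rest.takeWhile (fun y => y == x) ++ rest.dropWhile (fun y => y == x) :=
    (List.takeWhile_append_dropWhile).symm
  have htake : (rest.takeWhile (fun y => y == x)).count v = 0 := by
    apply List.count_eq_zero.mpr
    intro hmem
    have hyx := List.mem_takeWhile_imp (p := fun y => y == x) hmem
    exact hne (eq_of_beq hyx).symm
  calc (rest.dropWhile (fun y => y == x)).count v
      = (rest.takeWhile (fun y => y == x)).count v + (rest.dropWhile (fun y => y == x)).count v := by omega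
    _ = rest.count v := by rw [← List.count_append, ← hsplit]
    _ = (x :: rest).count v := by simp [hne]

theorem pv_mem_dropWhile_iff (x v : String) (hne : x ≠ v) (rest : List String) :
    v ∈ rest.dropWhile (fun y => y == x) ↔ v ∈ x :: rest := by
  constructor
  · intro hmm
    exact List.mem_cons_of_mem _ ((List.dropWhile_sublist _).mem hmm)
  · intro hmm
    rcases List.mem_cons.mp hmm with h1 | h1
    · exact absurd h1 (fun h => hne h.symm)
    · rw [← List.takeWhile_append_dropWhile (p := fun y => y == x) (l := rest)] at h1
      rcases List.mem_append.mp h1 with h3 | h3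
      · have hyx := List.mem_takeWhile_imp (p := fun y => y == x) h3
        exact absurd (eq_of_beq hyx).symm hne
      · exact h3

-- a non-matching counter component survives one outer-loop step unchanged
theorem pv_keep (x v : String) (hne : x ≠ v) (rest : List String) (c : Int) :
    (if v ∈ rest.dropWhile (fun y => y == x) then (((rest.dropWhile (fun y => y == x)).count v : Int)) else c)
      = (if v ∈ x :: rest then (((x :: rest).count v : Int)) else c) := by
  by_cases hm : v ∈ x :: rest
  · rw [if_pos hm, if_pos ((pv_mem_dropWhile_iff x v hne rest).mpr hm), pv_count_dropWhile x v hne rest]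
  · rw [if_neg hm, if_neg (fun h => hm ((pv_mem_dropWhile_iff x v hne rest).mp h))]

-- the matching counter component becomes the full count after its run is consumed
theorem pv_hit (x : String) (rest : List String) (hp : (x :: rest).Pairwise (· ≤ ·)) (c : Int) :
    (if x ∈ rest.dropWhile (fun y => y == x) then (((rest.dropWhile (fun y => y == x)).count x : Int))
       else (1 + ((rest.takeWhile (fun y => y == x)).length : Int)))
      = (if x ∈ x :: rest then (((x :: rest).count x : Int)) else c) := by
  rw [if_neg (pv_not_mem_dropWhile x rest hp), if_pos List.mem_cons_self, pv_run_count x rest hp]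
  push_cast; ring

theorem pv_bne_ne (x v : String) (h : ¬ (x == v) = true) : x ≠ v := fun he => h (by simp [he])

-- main invariant of the run-length scan on a sorted list
theorem pv_runTally_spec : ∀ (l : List String) (h m lo : Int), l.Pairwise (· ≤ ·) →
    pvRunTally l h m lo =
      ((if "high" ∈ l then (l.count "high" : Int) else h),
       (if "medium" ∈ l then (l.count "medium" : Int) else m),
       (if "low" ∈ l then (l.count "low" : Int) else lo)) := by
  intro l h m lo
  induction l, h, m, lo using pvRunTally.induct with
  | case1 h m lo => intro _; simp [pvRunTally]
  | case2 h m lo x rest cnt rest2 hx ih =>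
    intro hp
    have hps : (rest.dropWhile (fun y => y == x)).Pairwise (· ≤ ·) :=
      ((List.pairwise_cons.mp hp).2).sublist (List.dropWhile_sublist _)
    rw [pvRunTally]
    try simp only [cnt, rest2] at *
    simp only [hx, if_true, ih hps]
    have hxh : x = "high" := eq_of_beq hx
    subst hxh
    try simp only [Prod.mk.injEq]
    refine ⟨pv_hit _ rest hp h, pv_keep _ "medium" (by decide) rest m, pv_keep _ "low" (by decide) rest lo⟩
  | case3 h m lo x rest cnt rest2 hx1 hx ih =>
    intro hp
    have hps : (rest.dropWhile (fun y => y == x)).Pairwise (· ≤ ·) :=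
      ((List.pairwise_cons.mp hp).2).sublist (List.dropWhile_sublist _)
    rw [pvRunTally]
    try simp only [cnt, rest2] at *
    simp only [hx1, hx, if_true, Bool.false_eq_true, if_false, ih hps]
    have hxh : x = "medium" := eq_of_beq hx
    subst hxh
    try simp only [Prod.mk.injEq]
    refine ⟨pv_keep _ "high" (by decide) rest h, pv_hit _ rest hp m, pv_keep _ "low" (by decide) rest lo⟩
  | case4 h m lo x rest cnt rest2 hx1 hx2 hx ih =>
    intro hp
    have hps : (rest.dropWhile (fun y => y == x)).Pairwise (· ≤ ·) :=
      ((List.pairwise_cons.mp hp).2).sublist (List.dropWhile_sublist _)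
    rw [pvRunTally]
    try simp only [cnt, rest2] at *
    simp only [hx1, hx2, hx, if_true, Bool.false_eq_true, if_false, ih hps]
    have hxh : x = "low" := eq_of_beq hx
    subst hxh
    try simp only [Prod.mk.injEq]
    refine ⟨pv_keep _ "high" (by decide) rest h, pv_keep _ "medium" (by decide) rest m, pv_hit _ rest hp lo⟩
  | case5 h m lo x rest rest2 hx1 hx2 hx3 ih =>
    intro hp
    have hps : (rest.dropWhile (fun y => y == x)).Pairwise (· ≤ ·) :=
      ((List.pairwise_cons.mp hp).2).sublist (List.dropWhile_sublist _)
    rw [pvRunTally]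
    try simp only [rest2] at *
    simp only [hx1, hx2, hx3, Bool.false_eq_true, if_false, ih hps]
    try simp only [Prod.mk.injEq]
    exact ⟨pv_keep _ "high" (pv_bne_ne _ _ hx1) rest h,
           pv_keep _ "medium" (pv_bne_ne _ _ hx2) rest m,
           pv_keep _ "low" (pv_bne_ne _ _ hx3) rest lo⟩

-- sorting preserves each count; an absent value counts zero
theorem pv_sorted_if_count (xs : List String) (v : String) :
    (if v ∈ PySem.List.sorted xs (fun x => x) false then ((PySem.List.sorted xs (fun x => x) false).count v : Int) else (0 : Int))
      = (xs.count v : Int) := by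
  have hperm : (PySem.List.sorted xs (fun x => x) false).Perm xs := PySem.List.sorted_perm _ _ _
  by_cases hm : v ∈ PySem.List.sorted xs (fun x => x) false
  · rw [if_pos hm, hperm.count_eq]
  · rw [if_neg hm, List.count_eq_zero.mpr (fun h => hm (hperm.mem_iff.mpr h))]
    simp

-- ===== VERDICT (by name: the statement is the Claim_ definition above) =====
theorem build_review_report_spec : Claim_equal_build_review_report := by
  intro records _ _
  unfold Spec_build_review_report build_review_report build_review_report_alt
  simp only [pv_count_fold, zero_add,
    pv_runTally_spec _ 0 0 0 (PySem.List.sorted_pairwise _ _),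
    pv_sorted_if_count]
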